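-- pv_equiv track=rewrite | github.com/Yiwei-ZUO/gpt-generating-poetry | scripts/compare_poem_outputs.py | split_stanzas
-- ===== SOURCE A (Python) =====
-- def split_stanzas(poem: str) -> list[list[str]]:
--     raw_lines = [line.strip() for line in poem.splitlines() if line.strip()]
--     if any(line in {"<Q1>", "<Q2>", "<T1>", "<T2>"} for line in raw_lines):
--         stanzas: list[list[str]] = []
--         current: list[str] = []
--         for line in raw_lines:
--             if line in {"<BEGIN>", "<END>"}:
--                 continue
--             if line in {"<Q1>", "<Q2>", "<T1>", "<T2>"}:
--                 if current:
--                     stanzas.append(current)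
--                     current = []
--                 continue
--             current.append(line)
--         if current:
--             stanzas.append(current)
--         return stanzas
--
--     return [
--         [line.strip() for line in stanza.splitlines() if line.strip()]
--         for stanza in poem.split("\n\n")
--         if stanza.strip()
--     ]
-- ===== SOURCE B (Python) =====
-- def _clean_lines(text):
--     stripped = [line.strip() for line in text.splitlines()]
--     return [s for s in stripped if s]
--
-- def split_stanzas(poem: str) -> list[list[str]]:
--     markers = ("<Q1>", "<Q2>", "<T1>", "<T2>")
--     raw_lines = _clean_lines(poem)
--     if not any(l in markers for l in raw_lines):
--         return [_clean_lines(stanza) for stanza in poem.split("\n\n") if stanza.strip()]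
--     filtered = [l for l in raw_lines if l not in ("<BEGIN>", "<END>")]
--     stanzas = []
--     while filtered:
--         k = filtered[0] in markers
--         j = 1
--         while j < len(filtered) and (filtered[j] in markers) == k:
--             j += 1
--         if not k:
--             stanzas.append(filtered[:j])
--         filtered = filtered[j:]
--     return stanzas
-- ===== Notes on version B (the rewrite author's own statement) =====
-- stated objective: alternative
-- what changed: The marker branch's flush-on-marker accumulator loop is replaced by a run-scanning pass: BEGIN/END lines are filtered out first, then maximal runs of equal marker-status are peeled off with an inner scan and only non-marker runs are kept as stanzas.
import Mathlib
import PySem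

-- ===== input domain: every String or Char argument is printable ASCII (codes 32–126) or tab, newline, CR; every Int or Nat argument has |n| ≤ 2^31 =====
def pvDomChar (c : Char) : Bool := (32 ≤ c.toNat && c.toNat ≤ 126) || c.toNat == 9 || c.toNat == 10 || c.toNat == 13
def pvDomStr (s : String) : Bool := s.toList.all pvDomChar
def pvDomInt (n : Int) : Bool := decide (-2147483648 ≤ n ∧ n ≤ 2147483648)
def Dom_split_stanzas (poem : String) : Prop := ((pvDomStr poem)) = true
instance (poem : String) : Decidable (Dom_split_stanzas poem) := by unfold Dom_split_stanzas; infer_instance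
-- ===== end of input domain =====

-- B replaces A's flush-on-marker accumulator loop with a run-scanning pass (maximal marker/non-marker runs) after filtering BEGIN/END; objective: alternative decomposition, same cost.


-- shared string predicates (same literal sets in both Pythons)
def pvIsMarker (l : String) : Bool := l == "<Q1>" || l == "<Q2>" || l == "<T1>" || l == "<T2>"
def pvIsBE (l : String) : Bool := l == "<BEGIN>" || l == "<END>"

-- ===== PORT A =====
-- A's loop body as a step function over the state (stanzas, current)
def pvAStep (acc : List (List String) × List String) (line : String) :
    List (List String) × List String :=
  if pvIsBE line then acc
  else if pvIsMarker line then (if acc.2 ≠ [] then (acc.1 ++ [acc.2], []) else acc)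
  else (acc.1, acc.2 ++ [line])

def split_stanzas (poem : String) : List (List String) :=
  let raw_lines := (PySem.Str.splitlines poem).filterMap (fun line =>
    if PySem.Str.strip line == "" then none else some (PySem.Str.strip line))
  if raw_lines.any pvIsMarker then
    let st := raw_lines.foldl pvAStep ([], [])
    if st.2 ≠ [] then st.1 ++ [st.2] else st.1
  else
    (((PySem.Str.split? poem "\n\n").getD []).filter (fun s => !(PySem.Str.strip s == ""))).map
      (fun stanza => (PySem.Str.splitlines stanza).filterMap (fun line =>
        if PySem.Str.strip line == "" then none else some (PySem.Str.strip line)))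

-- ===== PORT B =====
def pvCleanLines (text : String) : List String :=
  ((PySem.Str.splitlines text).map PySem.Str.strip).filter (fun s => !(s == ""))

-- B's while loop: peel off the maximal run sharing the head's marker-status, keep non-marker runs
def pvRuns : List String → List (List String)
  | [] => []
  | x :: xs =>
    let k := pvIsMarker x
    let rest := xs.dropWhile (fun y => pvIsMarker y == k)
    if k then pvRuns rest
    else (x :: xs.takeWhile (fun y => pvIsMarker y == k)) :: pvRuns rest
termination_by ls => ls.length
decreasing_by
  all_goals simpa using Nat.lt_succ_of_le (List.length_dropWhile_le _ _)

def split_stanzas_alt (poem : String) : List (List String) :=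
  let raw_lines := pvCleanLines poem
  if !raw_lines.any pvIsMarker then
    (((PySem.Str.split? poem "\n\n").getD []).filter (fun s => !(PySem.Str.strip s == ""))).map pvCleanLines
  else
    pvRuns (raw_lines.filter (fun l => !pvIsBE l))

-- ===== PRECONDITION & SPEC =====
def Spec_split_stanzas (poem : String) (out : List (List String)) : Prop := out = split_stanzas_alt poem
instance (poem : String) (out : List (List String)) : Decidable (Spec_split_stanzas poem out) := by unfold Spec_split_stanzas; infer_instance

-- ===== CLAIM (what is proved, stated in full; the proofs are below) =====
def Claim_equal_split_stanzas : Prop := ∀ (poem : String), Dom_split_stanzas poem → Spec_split_stanzas poem (split_stanzas poem)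

-- ===== LEMMAS AND PROOFS =====

-- the filterMap comprehension of A is the map-then-filter of B
theorem pvClean_eq (ls : List String) :
    ls.filterMap (fun line =>
      if PySem.Str.strip line == "" then none else some (PySem.Str.strip line))
      = (ls.map PySem.Str.strip).filter (fun s => !(s == "")) := by
  induction ls with
  | nil => rfl
  | cons l t ih =>
    simp only [List.filterMap_cons, List.map_cons, List.filter_cons]
    cases h : (PySem.Str.strip l == "") <;>
      simp only [h, Bool.not_true, Bool.not_false, if_true, if_false, ih] <;> simp [ih]

-- proof-side description of A's loop result: g cur ls = remaining stanzas given pending current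
def pvG : List String → List String → List (List String)
  | cur, [] => if cur = [] then [] else [cur]
  | cur, x :: xs =>
    if pvIsBE x then pvG cur xs
    else if pvIsMarker x then (if cur = [] then pvG [] xs else cur :: pvG [] xs)
    else pvG (cur ++ [x]) xs

theorem pvFoldl_g (ls : List String) : ∀ (st : List (List String)) (cur : List String),
    (let r := ls.foldl pvAStep (st, cur); if r.2 ≠ [] then r.1 ++ [r.2] else r.1)
      = st ++ pvG cur ls := by
  induction ls with
  | nil =>
    intro st cur
    simp only [List.foldl_nil, pvG]
    by_cases h : cur = [] <;> simp [h]
  | cons x xs ih =>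
    intro st cur
    simp only [List.foldl_cons, pvAStep, pvG]
    by_cases hbe : pvIsBE x
    · simp [hbe, ih]
    · by_cases hm : pvIsMarker x
      · by_cases hc : cur = []
        · simp [hbe, hm, hc, ih]
        · simp [hbe, hm, hc, ih, List.append_assoc]
      · simp [hbe, hm, ih]

-- skipping a block of markers leaves pvG [] unchanged
theorem pvG_skip (t : List String) (r : List String)
    (h : ∀ y ∈ t, pvIsMarker y = true ∧ pvIsBE y = false) :
    pvG [] (t ++ r) = pvG [] r := by
  induction t with
  | nil => rfl
  | cons y t ih =>
    have hy := h y (by simp)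
    simp only [List.cons_append, pvG, hy.1, hy.2]
    exact ih (fun z hz => h z (by simp [hz]))

-- a block of non-marker lines is accumulated onto a nonempty current
theorem pvG_acc (t : List String) : ∀ (cur r : List String), cur ≠ [] →
    (∀ y ∈ t, pvIsMarker y = false ∧ pvIsBE y = false) →
    pvG cur (t ++ r) = pvG (cur ++ t) r := by
  induction t with
  | nil => intro cur r _ _; simp
  | cons y t ih =>
    intro cur r hc h
    have hy := h y (by simp)
    simp only [List.cons_append, pvG, hy.1, hy.2]
    rw [ih (cur ++ [y]) r (by simp) (fun z hz => h z (by simp [hz]))]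
    simp

theorem pvDropWhile_head_false {p : String → Bool} {l : List String} {r : String}
    {rs : List String} (h : l.dropWhile p = r :: rs) : p r = false := by
  induction l with
  | nil => simp at h
  | cons a t ih =>
    by_cases ha : p a
    · exact ih (by simpa [List.dropWhile_cons, ha] using h)
    · rw [List.dropWhile_cons] at h
      simp only [ha] at h
      cases h
      simpa using ha

theorem pvG_runs : ∀ (n : ℕ) (ls : List String), ls.length ≤ n →
    (∀ l ∈ ls, pvIsBE l = false) → pvG [] ls = pvRuns ls := by
  intro n
  induction n with
  | zero =>
    intro ls h _
    have : ls = [] := List.length_eq_zero_iff.mp (Nat.le_zero.mp h)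
    subst this; simp [pvG, pvRuns]
  | succ n ih =>
    intro ls hlen hbe
    match ls with
    | [] => simp [pvG, pvRuns]
    | x :: xs =>
      have hxbe : pvIsBE x = false := hbe x (by simp)
      have hxs_be : ∀ l ∈ xs, pvIsBE l = false := fun l hl => hbe l (by simp [hl])
      have hxslen : xs.length ≤ n := by simp only [List.length_cons] at hlen; omega
      by_cases hm : pvIsMarker x
      · -- marker head: both skip maximal marker run
        have hdecomp := List.takeWhile_append_dropWhile (p := fun y => pvIsMarker y == pvIsMarker x) (l := xs)
        have hskip : pvG [] xs = pvG [] (xs.dropWhile (fun y => pvIsMarker y == pvIsMarker x)) := by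
          conv_lhs => rw [← hdecomp]
          apply pvG_skip
          intro y hy
          have h1 := List.mem_takeWhile_imp hy
          have h2 : y ∈ xs := List.Sublist.mem hy (List.takeWhile_sublist _)
          simp only [hm, beq_iff_eq] at h1
          exact ⟨h1, hxs_be y h2⟩
        have hrest_len : (xs.dropWhile (fun y => pvIsMarker y == pvIsMarker x)).length ≤ n := by
          have := List.length_dropWhile_le (p := fun y => pvIsMarker y == pvIsMarker x) (l := xs)
          omega
        have hrest_be : ∀ l ∈ xs.dropWhile (fun y => pvIsMarker y == pvIsMarker x), pvIsBE l = false :=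
          fun l hl => hxs_be l (List.Sublist.mem hl (List.dropWhile_sublist _))
        simp only [pvG, hxbe, hm, if_true, if_false, Bool.false_eq_true]
        rw [hskip, ih _ hrest_len hrest_be, pvRuns]
        simp [hm]
      · -- non-marker head: accumulate the maximal non-marker run
        have hmx : pvIsMarker x = false := by simpa using hm
        have hdecomp := List.takeWhile_append_dropWhile (p := fun y => !pvIsMarker y) (l := xs)
        have hrest_len : (xs.dropWhile (fun y => !pvIsMarker y)).length ≤ n := by
          have := List.length_dropWhile_le (p := fun y => !pvIsMarker y) (l := xs); omega
        have hrest_be : ∀ l ∈ xs.dropWhile (fun y => !pvIsMarker y), pvIsBE l = false :=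
          fun l hl => hxs_be l (List.Sublist.mem hl (List.dropWhile_sublist _))
        have hacc : pvG [x] xs
            = pvG (x :: xs.takeWhile (fun y => !pvIsMarker y)) (xs.dropWhile (fun y => !pvIsMarker y)) := by
          conv_lhs => rw [← hdecomp]
          rw [pvG_acc _ [x] _ (by simp)
            (fun y hy => ⟨by simpa using List.mem_takeWhile_imp hy,
              hxs_be y (List.Sublist.mem hy (List.takeWhile_sublist _))⟩)]
          rfl
        have hlhs : pvG [] (x :: xs) = pvG [x] xs := by
          simp only [pvG, hxbe, hm]
          simp
        have hrhs : pvRuns (x :: xs)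
            = (x :: xs.takeWhile (fun y => !pvIsMarker y)) :: pvRuns (xs.dropWhile (fun y => !pvIsMarker y)) := by
          rw [pvRuns]
          simp [hmx]
        rw [hlhs, hacc, hrhs]
        cases hrr : xs.dropWhile (fun y => !pvIsMarker y) with
        | nil => simp only [pvG]; rw [pvRuns]; simp
        | cons r rs =>
          have hr : pvIsMarker r = true := by
            have := pvDropWhile_head_false hrr; simpa using this
          have hrbe : pvIsBE r = false := by
            rw [hrr] at hrest_be; exact hrest_be r (by simp)
          rw [hrr] at hrest_len
          have hstep : pvG (x :: xs.takeWhile (fun y => !pvIsMarker y)) (r :: rs)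
              = (x :: xs.takeWhile (fun y => !pvIsMarker y)) :: pvG [] rs := by
            simp [pvG, hrbe, hr]
          rw [hstep]
          congr 1
          have hG2 : pvG [] (r :: rs) = pvG [] rs := by simp [pvG, hrbe, hr]
          rw [← hG2]
          exact ih (r :: rs) hrest_len (hrr ▸ hrest_be)

-- A's step ignores BEGIN/END, so the fold over raw_lines equals the fold over the filtered list
theorem pvFoldl_filterBE (ls : List String) : ∀ acc,
    ls.foldl pvAStep acc = (ls.filter (fun l => !pvIsBE l)).foldl pvAStep acc := by
  induction ls with
  | nil => intro acc; rfl
  | cons x xs ih =>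
    intro acc
    by_cases hbe : pvIsBE x
    · simp only [List.foldl_cons, List.filter_cons, hbe]
      rw [show pvAStep acc x = acc by simp [pvAStep, hbe]]
      exact ih acc
    · simp only [List.foldl_cons, List.filter_cons, hbe]
      simp only [Bool.not_false, if_true]
      rw [List.foldl_cons]
      exact ih (pvAStep acc x)

-- ===== VERDICT (by name: the statement is the Claim_ definition above) =====
theorem split_stanzas_spec : Claim_equal_split_stanzas := by
  intro poem _
  unfold Spec_split_stanzas split_stanzas split_stanzas_alt
  simp only [pvClean_eq]
  set raw := ((PySem.Str.splitlines poem).map PySem.Str.strip).filter (fun s => !(s == "")) with hraw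
  by_cases hany : raw.any pvIsMarker
  · simp only [hany, if_true, Bool.not_true, Bool.false_eq_true, if_false, pvCleanLines, ← hraw]
    rw [pvFoldl_filterBE]
    have := pvFoldl_g (raw.filter (fun l => !pvIsBE l)) [] []
    simp only [List.nil_append] at this
    rw [this]
    exact pvG_runs (raw.filter (fun l => !pvIsBE l)).length _ le_rfl
      (fun l hl => by simpa using (List.mem_filter.mp hl).2)
  · simp only [hany, Bool.false_eq_true, if_false, Bool.not_false, if_true, pvCleanLines, ← hraw]
    rfl
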